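-- pv_equiv track=rewrite | github.com/chickengak/TIL | 프로그래머스/Lv.3/42884. 단속카메라/단속카메라.py | solution
-- ===== SOURCE A (Python) =====
-- def solution(routes):
--     answer = 0
--     routes.sort(key=lambda x : (x[1], x[0]))    # 나가는 순으로 정렬
--     from_idx = 0
--     while from_idx < len(routes):
--         to_idx = from_idx
--         while to_idx+1 < len(routes) and routes[to_idx+1][0] <= routes[from_idx][1]:
--             to_idx += 1
--         answer +=1
--         from_idx = to_idx + 1
--     return answer
-- ===== SOURCE B (Python) =====
-- def solution(routes):
--     routes.sort(key=lambda x: (x[1], x[0]))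
--     def count(rs):
--         if not rs:
--             return 0
--         e = rs[0][1]
--         return 1 + count([r for r in rs[1:] if r[0] > e])
--     return count(routes)
-- ===== Notes on version B (the rewrite author's own statement) =====
-- stated objective: alternative
-- what changed: Replaces A's nested index-jumping while loops (inner loop walking consecutive indices to find each group's end) with the textbook recursive stabbing greedy: take the earliest-ending route, filter out every route whose start is <= that end anywhere in the remainder, and recurse on what is left.
import Mathlib
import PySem

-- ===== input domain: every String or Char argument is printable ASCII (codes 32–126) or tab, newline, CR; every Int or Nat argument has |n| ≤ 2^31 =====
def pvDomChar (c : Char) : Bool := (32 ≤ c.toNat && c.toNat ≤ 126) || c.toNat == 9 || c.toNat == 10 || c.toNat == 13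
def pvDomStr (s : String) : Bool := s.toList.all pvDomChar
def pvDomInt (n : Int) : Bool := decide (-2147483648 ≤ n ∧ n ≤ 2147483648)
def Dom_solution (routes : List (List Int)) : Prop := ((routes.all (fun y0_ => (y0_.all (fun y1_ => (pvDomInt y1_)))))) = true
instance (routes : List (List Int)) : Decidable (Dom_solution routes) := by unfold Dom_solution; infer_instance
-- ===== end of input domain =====

-- B replaces A's consecutive-group index walk (nested while loops jumping indices)
-- by the textbook recursive stabbing greedy: take the earliest-ending route, discard
-- every route it can share a camera with (start ≤ that end), recurse on the rest.
-- Both sort the argument in place in Python — the equivalence proved here is about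
-- the return value only.

-- ===== PORT A =====
-- inner while loop: extend to_idx while the next route starts no later than routes[from_idx][1]
def innerA (rs : List (List Int)) (bound : Int) (to_idx : Nat) : Nat :=
  if h : to_idx + 1 < rs.length ∧ PySem.List.pyGetD (rs.getD (to_idx + 1) []) 0 0 ≤ bound then
    innerA rs bound (to_idx + 1)
  else to_idx
termination_by rs.length - to_idx
decreasing_by omega

-- termination fact for the outer loop (cited in outerA's decreasing_by)
theorem innerA_ge (rs : List (List Int)) (bound : Int) (j : Nat) : j ≤ innerA rs bound j := by
  rw [innerA]
  split
  next h => exact le_trans (by omega) (innerA_ge rs bound (j + 1))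
  next => exact le_refl j
termination_by rs.length - j
decreasing_by omega

-- outer while loop with the running 'answer' accumulator
def outerA (rs : List (List Int)) (from_idx : Nat) (answer : Int) : Int :=
  if h : from_idx < rs.length then
    outerA rs (innerA rs (PySem.List.pyGetD (rs.getD from_idx []) 1 0) from_idx + 1) (answer + 1)
  else answer
termination_by rs.length - from_idx
decreasing_by
  have := innerA_ge rs (PySem.List.pyGetD (rs.getD from_idx []) 1 0) from_idx
  omega

def solution (routes : List (List Int)) : Int :=
  outerA (PySem.List.sorted2 routes (fun x => PySem.List.pyGetD x 1 0) (fun x => PySem.List.pyGetD x 0 0)) 0 0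

-- ===== PORT B =====
-- Source B's recursive helper 'count': head's end stabs everything starting no later
def countB : List (List Int) → Int
  | [] => 0
  | r :: t =>
      1 + countB (t.filter (fun x => decide (PySem.List.pyGetD x 0 0 > PySem.List.pyGetD r 1 0)))
termination_by rs => rs.length
decreasing_by
  simp only [List.length_unattach, List.length_cons]
  exact Nat.lt_succ_of_le (le_trans (List.length_filter_le _ _) (by simp))

def solution_alt (routes : List (List Int)) : Int :=
  countB (PySem.List.sorted2 routes (fun x => PySem.List.pyGetD x 1 0) (fun x => PySem.List.pyGetD x 0 0))

-- ===== PRECONDITION & SPEC =====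
-- Pre_ excludes exactly the inputs where A raises: a route with fewer than 2 entries
-- makes A's sort key x[1] (or x[0]) raise IndexError.
def Pre_solution (routes : List (List Int)) : Prop := ∀ r ∈ routes, 2 ≤ r.length
instance (routes : List (List Int)) : Decidable (Pre_solution routes) := by unfold Pre_solution; infer_instance

def pvWitness_solution : List (List Int) := [[1, 5], [2, 3]]

def Spec_solution (routes : List (List Int)) (out : Int) : Prop := out = solution_alt routes
instance (routes : List (List Int)) (out : Int) : Decidable (Spec_solution routes out) := by unfold Spec_solution; infer_instance

-- ===== CLAIM (what is proved, stated in full; the proofs are below) =====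
def Claim_equal_solution : Prop := ∀ (routes : List (List Int)), Dom_solution routes → Pre_solution routes → Spec_solution routes (solution routes)

-- ===== LEMMAS AND PROOFS =====

-- abbreviations for the two keys
def startK (r : List Int) : Int := PySem.List.pyGetD r 0 0
def endK (r : List Int) : Int := PySem.List.pyGetD r 1 0

-- camera count of a tail while a group with right end `e` is open (flat-scan view of A)
def Gaux (e : Int) : List (List Int) → Int
  | [] => 0
  | r :: t => if startK r > e then 1 + Gaux (endK r) t else Gaux e t

-- camera count of a whole list
def Glist : List (List Int) → Int
  | [] => 0
  | r :: t => 1 + Gaux (endK r) t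

theorem innerA_eq (rs : List (List Int)) (bound : Int) (j : Nat) :
    innerA rs bound j =
      j + ((rs.drop (j + 1)).takeWhile (fun r => decide (startK r ≤ bound))).length := by
  rw [innerA]
  split
  next h =>
    obtain ⟨h1, h2⟩ := h
    rw [innerA_eq rs bound (j + 1), List.drop_eq_getElem_cons h1, List.takeWhile_cons]
    rw [List.getD_eq_getElem rs [] h1] at h2
    simp only [startK, h2, decide_true, if_pos]
    simp [List.length_cons]
    omega
  next h =>
    by_cases h1 : j + 1 < rs.length
    · have h2 : ¬ startK rs[j + 1] ≤ bound := by
        intro hc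
        exact h ⟨h1, by rw [List.getD_eq_getElem rs [] h1]; exact hc⟩
      rw [List.drop_eq_getElem_cons h1, List.takeWhile_cons]
      simp [h2]
    · rw [List.drop_eq_nil_of_le (by omega)]
      simp
termination_by rs.length - j
decreasing_by omega

theorem gaux_dropWhile (e : Int) (t : List (List Int)) :
    Gaux e t = Glist (t.dropWhile (fun r => decide (startK r ≤ e))) := by
  induction t with
  | nil => rfl
  | cons r t ih =>
    by_cases h : startK r ≤ e
    · rw [Gaux, if_neg (by omega), List.dropWhile_cons_of_pos (by simpa using h)]
      exact ih
    · rw [Gaux, if_pos (by omega), List.dropWhile_cons_of_neg (by simpa using h)]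
      rfl

theorem drop_length_takeWhile {α : Type} (t : List α) (p : α → Bool) :
    t.drop (t.takeWhile p).length = t.dropWhile p := by
  induction t with
  | nil => rfl
  | cons a t ih =>
    by_cases hpa : p a
    · simp [List.takeWhile_cons_of_pos hpa, List.dropWhile_cons_of_pos hpa, ih]
    · simp [List.takeWhile_cons_of_neg hpa, List.dropWhile_cons_of_neg hpa]

theorem outerA_eq (rs : List (List Int)) (j : Nat) (ans : Int) :
    outerA rs j ans = ans + Glist (rs.drop j) := by
  rw [outerA]
  split
  next h =>
    have hg : rs.getD j [] = rs[j] := List.getD_eq_getElem rs [] h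
    rw [innerA_eq, hg, outerA_eq rs _ (ans + 1)]
    have hdrop : rs.drop (j + ((rs.drop (j + 1)).takeWhile
          (fun r => decide (startK r ≤ PySem.List.pyGetD rs[j] 1 0))).length + 1)
        = (rs.drop (j + 1)).drop ((rs.drop (j + 1)).takeWhile
          (fun r => decide (startK r ≤ PySem.List.pyGetD rs[j] 1 0))).length := by
      rw [List.drop_drop]
      congr 1
      omega
    rw [hdrop, drop_length_takeWhile, List.drop_eq_getElem_cons h,
      show Glist (rs[j] :: rs.drop (j + 1)) = 1 + Gaux (endK rs[j]) (rs.drop (j + 1)) from rfl,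
      show (PySem.List.pyGetD rs[j] 1 0) = endK rs[j] from rfl, gaux_dropWhile]
    omega
  next h =>
    rw [List.drop_eq_nil_of_le (by omega)]
    simp [Glist]
termination_by rs.length - j
decreasing_by omega

-- inserting with a 'before' test compatible with a transitive relation preserves Pairwise
theorem pairwise_insertBy {α : Type} (R : α → α → Prop) (before : α → α → Bool) (x : α)
    (l : List α)
    (htrans : ∀ a b c, R a b → R b c → R a c)
    (h1 : ∀ y, before x y = true → R x y) (h2 : ∀ y, before x y = false → R y x)
    (hl : l.Pairwise R) : (PySem.List.insertBy before x l).Pairwise R := by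
  induction l with
  | nil => simp [PySem.List.insertBy]
  | cons y ys ih =>
    rw [List.pairwise_cons] at hl
    obtain ⟨hy, hys⟩ := hl
    rw [PySem.List.insertBy]
    by_cases hb : before x y = true
    · rw [if_pos hb]
      refine List.pairwise_cons.mpr ⟨?_, List.pairwise_cons.mpr ⟨hy, hys⟩⟩
      intro z hz
      rcases List.mem_cons.mp hz with h | h
      · exact h ▸ h1 y hb
      · exact htrans x y z (h1 y hb) (hy z h)
    · rw [if_neg hb]
      refine List.pairwise_cons.mpr ⟨?_, ih hys⟩
      intro z hz
      rcases (PySem.List.mem_insertBy _ _ _ _).mp hz with h | h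
      · exact h ▸ h2 y (by simpa using hb)
      · exact hy z h
  
-- sorted2 output is Pairwise-nondecreasing in its primary key
theorem sorted2_pairwise_k1 (xs : List (List Int)) :
    (PySem.List.sorted2 xs endK startK).Pairwise (fun a b => endK a ≤ endK b) := by
  rw [PySem.List.sorted2]
  have : ∀ acc, acc.Pairwise (fun a b => endK a ≤ endK b) →
      (xs.foldl (fun acc x => PySem.List.insertBy
        (fun a b => decide (endK a < endK b) || (!decide (endK b < endK a) && decide (startK a < startK b))) x acc) acc).Pairwise
        (fun a b => endK a ≤ endK b) := by
    induction xs with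
    | nil => intro acc h; simpa using h
    | cons x t ih =>
      intro acc h
      rw [List.foldl_cons]
      refine ih _ ?_
      refine pairwise_insertBy _ _ _ _ (fun a b c => le_trans) ?_ ?_ h
      · intro y hy
        simp only [Bool.or_eq_true, Bool.and_eq_true, decide_eq_true_eq, Bool.not_eq_true',
          decide_eq_false_iff_not] at hy
        rcases hy with h | ⟨h, _⟩ <;> omega
      · intro y hy
        simp only [Bool.or_eq_false_iff, Bool.and_eq_false_iff, decide_eq_false_iff_not] at hy
        omega
  exact this [] (by simp)

-- core: the flat group scan equals the filter recursion on an end-sorted tail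
theorem countB_nil : countB [] = 0 := by simp [countB]

theorem countB_cons (r : List Int) (t : List (List Int)) :
    countB (r :: t)
      = 1 + countB (t.filter (fun x => decide (PySem.List.pyGetD x 0 0 > PySem.List.pyGetD r 1 0))) := by
  simp [countB]

theorem gaux_eq_countB_filter (t : List (List Int)) : ∀ (e : Int),
    t.Pairwise (fun a b => endK a ≤ endK b) →
    (∀ r ∈ t, e ≤ endK r) →
    Gaux e t = countB (t.filter (fun r => decide (startK r > e))) := by
  induction t with
  | nil => intro e _ _; rw [List.filter_nil, countB_nil]; rfl
  | cons r t ih =>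
    intro e hsorted hle
    rw [List.pairwise_cons] at hsorted
    obtain ⟨hr, ht⟩ := hsorted
    have her : e ≤ endK r := hle r List.mem_cons_self
    by_cases h : startK r > e
    · rw [Gaux, if_pos h, List.filter_cons_of_pos (by simpa using h), countB_cons]
      have hff : (t.filter (fun x => decide (startK x > e))).filter
            (fun x => decide (PySem.List.pyGetD x 0 0 > PySem.List.pyGetD r 1 0))
          = t.filter (fun x => decide (startK x > endK r)) := by
        rw [List.filter_filter]
        refine List.filter_congr ?_
        intro x hx
        show (decide (startK x > endK r) && decide (startK x > e))
            = decide (startK x > endK r)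
        by_cases hx2 : startK x > endK r
        · simp [hx2, show startK x > e by omega]
        · simp [hx2]
      rw [hff, ih (endK r) ht (fun x hx => hr x hx)]
    · rw [Gaux, if_neg h, List.filter_cons_of_neg (by simpa using h)]
      exact ih e ht (fun x hx => le_trans her (hr x hx))

theorem glist_eq_countB (l : List (List Int))
    (hsorted : l.Pairwise (fun a b => endK a ≤ endK b)) :
    Glist l = countB l := by
  cases l with
  | nil => rw [countB_nil]; rfl
  | cons r t =>
    rw [List.pairwise_cons] at hsorted
    obtain ⟨hr, ht⟩ := hsorted
    rw [Glist, countB_cons,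
      show (fun x => decide (PySem.List.pyGetD x 0 0 > PySem.List.pyGetD r 1 0))
          = (fun x => decide (startK x > endK r)) from rfl,
      gaux_eq_countB_filter t (endK r) ht hr]

-- ===== VERDICT (by name: the statement is the Claim_ definition above) =====
theorem solution_spec : Claim_equal_solution := by
  intro routes _ _
  unfold Spec_solution solution solution_alt
  rw [outerA_eq, List.drop_zero, zero_add]
  exact glist_eq_countB _ (sorted2_pairwise_k1 routes)
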